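-- pv_equiv track=rewrite | github.com/masasa123jp/Web_Ledger | backend/dashboard/dashboard_data_management_service.py | create_ledger_records
-- ===== SOURCE A (Python) =====
-- def create_ledger_records(label_mapping, data_rows):
--     """
--     label_mapping: { "1": "ID", "2": "テーマ名", ... }
--     data_rows: ledger_records から取得した行 [ (id, data_id, column_id, data, ...), ... ]
--
--     同じ data_id をまとめて1行とし、label_mapping[column_id] をキー、data を値とする dict を作る。
--     """
--     records = {}
--     for row in data_rows:
--         record_id   = row[1]  # data_id
--         field_key   = str(row[2])   # column_id
--         field_value = row[3]
--         if record_id not in records: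
--             records[record_id] = {}
--         label = label_mapping.get(field_key, field_key)
--         records[record_id][label] = field_value
--     # record_id 昇順にソートしてリスト化
--     ledger_records = [records[k] for k in sorted(records.keys())]
--     return ledger_records
-- ===== SOURCE B (Python) =====
-- def create_ledger_records(label_mapping, data_rows):
--     ids = sorted({row[1] for row in data_rows})
--     return [
--         {label_mapping.get(str(row[2]), str(row[2])): row[3]
--          for row in data_rows if row[1] == rid}
--         for rid in ids
--     ]
-- ===== Notes on version B (the rewrite author's own statement) =====
-- stated objective: simpler
-- what changed: Replaces the incremental dict-of-dicts grouping (hash map keyed by data_id, then sorted keys) by first computing the sorted set of ids and then building each record with one filtered dict comprehension over the rows.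
import Mathlib
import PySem

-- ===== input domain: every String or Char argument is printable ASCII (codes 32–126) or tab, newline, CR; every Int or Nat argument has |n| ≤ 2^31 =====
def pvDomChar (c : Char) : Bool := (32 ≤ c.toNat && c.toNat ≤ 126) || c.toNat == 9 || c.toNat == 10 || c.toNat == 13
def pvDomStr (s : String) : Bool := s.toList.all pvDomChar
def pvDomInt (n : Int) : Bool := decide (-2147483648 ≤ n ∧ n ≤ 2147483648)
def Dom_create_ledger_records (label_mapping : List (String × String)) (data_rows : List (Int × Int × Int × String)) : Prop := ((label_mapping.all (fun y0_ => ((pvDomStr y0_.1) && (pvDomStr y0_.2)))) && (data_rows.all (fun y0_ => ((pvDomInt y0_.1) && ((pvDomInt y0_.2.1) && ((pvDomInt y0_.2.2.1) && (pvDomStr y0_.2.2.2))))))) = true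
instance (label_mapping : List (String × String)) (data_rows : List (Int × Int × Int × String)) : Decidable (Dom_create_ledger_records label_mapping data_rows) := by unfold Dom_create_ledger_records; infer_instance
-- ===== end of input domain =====

-- B replaces A's hash-map grouping (dict of dicts, then sorted keys) by computing the sorted set
-- of ids first and building each record by a filtered comprehension pass; objective: simpler.


-- ===== PORT A =====
-- label_mapping.get(str(row[2]), str(row[2])) — the lookup expression both Pythons contain verbatim
def pvLabel (label_mapping : List (String × String)) (column_id : Int) : String :=
  let field_key := PySem.Int.toStr column_id
  PySem.Dict.getD (PySem.Dict.mk label_mapping) field_key field_key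

-- the body of A's 'for row in data_rows' loop; 'records[record_id][label] = v' is a get (the key is
-- guaranteed present by the branch just above, so getD with an unreachable default is exact) + insert
def stepA (label_mapping : List (String × String))
    (records : PySem.Dict Int (PySem.Dict String String)) (row : Int × Int × Int × String) :
    PySem.Dict Int (PySem.Dict String String) :=
  let record_id := row.2.1
  let field_value := row.2.2.2
  let records :=
    if records.contains record_id then records
    else records.insert record_id PySem.Dict.empty
  let label := pvLabel label_mapping row.2.2.1
  records.insert record_id ((records.getD record_id PySem.Dict.empty).insert label field_value)

def create_ledger_records (label_mapping : List (String × String)) (data_rows : List (Int × Int × Int × String)) : List (List (String × String)) :=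
  let records := data_rows.foldl (stepA label_mapping) PySem.Dict.empty
  -- [records[k] for k in sorted(records.keys())]; records[k] is present for every k in keys
  (PySem.List.sorted records.keys (fun k => k)).map
    (fun k => (records.getD k PySem.Dict.empty).items)

-- ===== PORT B =====
-- the dict comprehension '{label(...): row[3] for row in data_rows if row[1] == rid}'
def comprB (label_mapping : List (String × String)) (data_rows : List (Int × Int × Int × String))
    (rid : Int) : PySem.Dict String String :=
  (data_rows.filter (fun row => row.2.1 == rid)).foldl
    (fun d row => d.insert (pvLabel label_mapping row.2.2.1) row.2.2.2) PySem.Dict.empty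

def create_ledger_records_alt (label_mapping : List (String × String)) (data_rows : List (Int × Int × Int × String)) : List (List (String × String)) :=
  let ids := PySem.List.sorted (PySem.Set.ofList (data_rows.map (fun row => row.2.1))) (fun k => k)
  ids.map (fun rid => (comprB label_mapping data_rows rid).items)

-- ===== PRECONDITION & SPEC =====
def Spec_create_ledger_records (label_mapping : List (String × String)) (data_rows : List (Int × Int × Int × String)) (out : List (List (String × String))) : Prop := out = create_ledger_records_alt label_mapping data_rows
instance (label_mapping : List (String × String)) (data_rows : List (Int × Int × Int × String)) (out : List (List (String × String))) : Decidable (Spec_create_ledger_records label_mapping data_rows out) := by unfold Spec_create_ledger_records; infer_instance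

-- ===== CLAIM (what is proved, stated in full; the proofs are below) =====
def Claim_equal_create_ledger_records : Prop := ∀ (label_mapping : List (String × String)) (data_rows : List (Int × Int × Int × String)), Dom_create_ledger_records label_mapping data_rows → Spec_create_ledger_records label_mapping data_rows (create_ledger_records label_mapping data_rows)

-- ===== LEMMAS AND PROOFS =====

-- A's loop body collapses to a single insert of the extended inner dict
theorem stepA_eq (lm : List (String × String)) (records : PySem.Dict Int (PySem.Dict String String))
    (row : Int × Int × Int × String) :
    stepA lm records row =
      records.insert row.2.1
        ((records.getD row.2.1 PySem.Dict.empty).insert (pvLabel lm row.2.2.1) row.2.2.2) := by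
  unfold stepA
  by_cases h : records.contains row.2.1 = true
  · simp [h]
  · simp only [Bool.not_eq_true] at h
    have hd : records.getD row.2.1 PySem.Dict.empty = PySem.Dict.empty := by
      simp only [PySem.Dict.contains] at h
      rw [PySem.Dict.getD, PySem.Dict.get?, List.find?_eq_none.mpr (List.any_eq_false.mp h)]
      rfl
    simp [h, PySem.Dict.getD_insert_self, PySem.Dict.insert_insert_self, hd]

-- the inner dict accumulated for key k is the fold over exactly the rows whose id is k
theorem getD_foldA (lm : List (String × String)) (rows : List (Int × Int × Int × String))
    (records : PySem.Dict Int (PySem.Dict String String)) (k : Int) :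
    (rows.foldl (stepA lm) records).getD k PySem.Dict.empty =
      (rows.filter (fun row => row.2.1 == k)).foldl
        (fun d row => d.insert (pvLabel lm row.2.2.1) row.2.2.2)
        (records.getD k PySem.Dict.empty) := by
  induction rows generalizing records with
  | nil => rfl
  | cons r t ih =>
    simp only [List.foldl_cons, List.filter_cons, ih, stepA_eq]
    by_cases h : r.2.1 = k
    · simp [h, PySem.Dict.getD_insert_self]
    · simp [h, PySem.Dict.getD_insert, Ne.symm h, beq_iff_eq]

-- membership in the accumulated keys
theorem mem_keys_foldA (lm : List (String × String)) (rows : List (Int × Int × Int × String))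
    (records : PySem.Dict Int (PySem.Dict String String)) (k : Int) :
    k ∈ (rows.foldl (stepA lm) records).keys ↔
      k ∈ records.keys ∨ k ∈ rows.map (fun row => row.2.1) := by
  induction rows generalizing records with
  | nil => simp
  | cons r t ih =>
    simp only [List.foldl_cons, List.map_cons, List.mem_cons, ih, stepA_eq,
      PySem.Dict.mem_keys_insert]
    tauto

-- the accumulated keys stay duplicate-free
theorem nodup_keys_foldA (lm : List (String × String)) (rows : List (Int × Int × Int × String))
    (records : PySem.Dict Int (PySem.Dict String String)) (h : records.keys.Nodup) :
    (rows.foldl (stepA lm) records).keys.Nodup := by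
  induction rows generalizing records with
  | nil => exact h
  | cons r t ih =>
    exact ih _ (by rw [stepA_eq]; exact PySem.Dict.nodup_keys_insert _ _ _ h)

-- ===== VERDICT (by name: the statement is the Claim_ definition above) =====
theorem create_ledger_records_spec : Claim_equal_create_ledger_records := by
  intro lm rows _
  show create_ledger_records lm rows = create_ledger_records_alt lm rows
  simp only [create_ledger_records, create_ledger_records_alt]
  have hperm :
      ((rows.foldl (stepA lm) PySem.Dict.empty).keys).Perm
        (PySem.Set.ofList (rows.map (fun row => row.2.1))) := by
    rw [List.perm_ext_iff_of_nodup
      (nodup_keys_foldA lm rows PySem.Dict.empty PySem.Dict.nodup_keys_empty)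
      (PySem.Set.nodup_ofList _)]
    intro a
    rw [mem_keys_foldA, PySem.Set.mem_ofList]
    simp [PySem.Dict.keys_empty]
  rw [PySem.List.sorted_eq_sorted_of_perm _ _ (fun k => k) (fun _ _ h => h) hperm]
  refine List.map_congr_left (fun k _ => ?_)
  rw [getD_foldA]
  simp [comprB, PySem.Dict.getD_empty]
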